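-- pv_equiv track=rewrite | github.com/therazi12/proyecto | app/utils.py | sanitizar_texto
-- ===== SOURCE A (Python) =====
-- def sanitizar_texto(texto):
--     """
--     Limpia y sanitiza texto de entrada
--     """
--     if not texto:
--         return ""
--
--     # Eliminar espacios al inicio y final
--     texto = texto.strip()
--
--     # Eliminar caracteres especiales peligrosos
--     caracteres_peligrosos = ['<', '>', '"', "'", '&']
--     for char in caracteres_peligrosos:
--         texto = texto.replace(char, '')
--
--     return texto
-- ===== SOURCE B (Python) =====
-- _PELIGROSOS = frozenset('<>"\'&')
--
-- def sanitizar_texto(texto):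
--     """
--     Limpia y sanitiza texto de entrada
--     """
--     if not texto:
--         return ""
--     return ''.join(c for c in texto.strip() if c not in _PELIGROSOS)
-- ===== Notes on version B (the rewrite author's own statement) =====
-- stated objective: idiomatic
-- what changed: Replaces five sequential str.replace scans with a single pass over the stripped text that keeps characters not in a frozenset of dangerous characters.
import Mathlib
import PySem

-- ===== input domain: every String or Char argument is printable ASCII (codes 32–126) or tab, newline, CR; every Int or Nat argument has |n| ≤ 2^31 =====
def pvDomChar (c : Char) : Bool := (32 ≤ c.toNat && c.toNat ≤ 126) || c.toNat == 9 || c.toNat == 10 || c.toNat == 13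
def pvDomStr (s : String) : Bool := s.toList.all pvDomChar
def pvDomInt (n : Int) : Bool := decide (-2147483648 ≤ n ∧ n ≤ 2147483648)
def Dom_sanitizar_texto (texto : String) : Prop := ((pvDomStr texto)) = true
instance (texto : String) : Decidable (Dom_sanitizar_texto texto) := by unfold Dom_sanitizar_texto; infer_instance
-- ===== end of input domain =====

-- B replaces A's five sequential .replace scans by one filtering pass over the stripped text (idiomatic).


-- ===== PORT A =====
-- literal transliteration: falsy guard, strip, then a loop of replace(char, '') over the dangerous list
def sanitizar_texto (texto : String) : String :=
  if texto = "" then ""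
  else
    let texto := PySem.Str.strip texto
    let caracteres_peligrosos : List String := ["<", ">", "\"", "'", "&"]
    caracteres_peligrosos.foldl (fun t ch => PySem.Str.replace t ch "") texto

-- ===== PORT B =====
def pvPeligrosos : List Char := ['<', '>', '"', '\'', '&']

-- literal transliteration of Source B: guard, then join of the characters of strip(texto) not in the set
def sanitizar_texto_alt (texto : String) : String :=
  if texto = "" then ""
  else String.ofList ((PySem.Str.strip texto).toList.filter (fun c => !(pvPeligrosos.contains c)))

-- ===== PRECONDITION & SPEC =====
def Spec_sanitizar_texto (texto : String) (out : String) : Prop := out = sanitizar_texto_alt texto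
instance (texto : String) (out : String) : Decidable (Spec_sanitizar_texto texto out) := by unfold Spec_sanitizar_texto; infer_instance

-- ===== CLAIM (what is proved, stated in full; the proofs are below) =====
def Claim_equal_sanitizar_texto : Prop := ∀ (texto : String), Dom_sanitizar_texto texto → Spec_sanitizar_texto texto (sanitizar_texto texto)

-- ===== LEMMAS AND PROOFS =====

-- replace.go with a single-character pattern and empty replacement deletes every occurrence
lemma replace_go_single (d : Char) :
    ∀ (fuel : Nat) (l acc : List Char), l.length ≤ fuel →
      PySem.Chars.replace.go [d] [] fuel l acc
        = acc.reverse ++ l.filter (fun c => !(c == d)) := by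
  intro fuel
  induction fuel with
  | zero =>
    intro l acc h
    have : l = [] := List.length_eq_zero_iff.mp (Nat.le_zero.mp h)
    subst this
    simp [PySem.Chars.replace.go]
  | succ n ih =>
    intro l acc h
    cases l with
    | nil => simp [PySem.Chars.replace.go]
    | cons c t =>
      simp only [PySem.Chars.replace.go]
      by_cases hc : c = d
      · subst hc
        have hp : List.isPrefixOf [c] (c :: t) = true := by
          simp [List.isPrefixOf]
        rw [if_pos hp]
        have := ih t acc (by simpa using Nat.le_of_succ_le_succ h)
        simpa [List.filter_cons] using this
      · have hp : List.isPrefixOf [d] (c :: t) = false := by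
          simp [List.isPrefixOf]
          exact fun e => (hc e.symm).elim
        rw [if_neg (by simp [hp])]
        have := ih t (c :: acc) (by simpa using Nat.le_of_succ_le_succ h)
        rw [this]
        simp [hc]

-- Chars.replace deleting one character is a filter
lemma replace_single_eq_filter (d : Char) (l : List Char) :
    PySem.Chars.replace l [d] [] = l.filter (fun c => !(c == d)) := by
  simp [PySem.Chars.replace, replace_go_single d l.length l [] (le_refl _)]

lemma toList_eq_imp_eq (s t : String) (h : s.toList = t.toList) : s = t :=
  String.toList_inj.mp h

-- ===== VERDICT (by name: the statement is the Claim_ definition above) =====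
theorem sanitizar_texto_spec : Claim_equal_sanitizar_texto := by
  intro texto _
  unfold Spec_sanitizar_texto sanitizar_texto sanitizar_texto_alt
  by_cases h : texto = ""
  · simp [h]
  · rw [if_neg h, if_neg h]
    apply toList_eq_imp_eq
    simp only [List.foldl_cons, List.foldl_nil, PySem.Str.toList_replace, String.toList_ofList]
    rw [show ("<" : String).toList = ['<'] from rfl,
        show (">" : String).toList = ['>'] from rfl,
        show ("\"" : String).toList = ['"'] from rfl,
        show ("'" : String).toList = ['\''] from rfl,
        show ("&" : String).toList = ['&'] from rfl,
        show ("" : String).toList = [] from rfl]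
    simp only [replace_single_eq_filter, List.filter_filter]
    apply List.filter_congr
    intro c _
    cases h1 : c == '<' <;> cases h2 : c == '>' <;> cases h3 : c == '"' <;>
      cases h4 : c == '\'' <;> cases h5 : c == '&' <;>
        simp_all [pvPeligrosos]
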